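-- pv_equiv track=rewrite | github.com/CannonLock/PyCode | DeepLearning.py | standardize_songs
-- ===== SOURCE A (Python) =====
-- def standardize_songs(songs):
--
-- 	max_song_length = max(map(len, songs))
--
-- 	adjusted_songs = []
-- 	for song in songs:
--
-- 		song_length = len(song)
-- 		full_addition = max_song_length // song_length
-- 		part_addition = max_song_length % song_length
--
-- 		adjusted_song = song*full_addition
-- 		adjusted_song.extend(song[:part_addition])
--
-- 		adjusted_songs.append(adjusted_song)
--
-- 	return adjusted_songs
-- ===== SOURCE B (Python) =====
-- def standardize_songs(songs):
-- 	max_song_length = max(map(len, songs))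
-- 	return [[song[i % len(song)] for i in range(max_song_length)] for song in songs]
-- ===== Notes on version B (the rewrite author's own statement) =====
-- stated objective: idiomatic
-- what changed: Replaces the quotient/remainder block construction (list repetition plus a slice, built with an accumulator loop) by a single comprehension that cycles each song via per-element modulo indexing.
import Mathlib
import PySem

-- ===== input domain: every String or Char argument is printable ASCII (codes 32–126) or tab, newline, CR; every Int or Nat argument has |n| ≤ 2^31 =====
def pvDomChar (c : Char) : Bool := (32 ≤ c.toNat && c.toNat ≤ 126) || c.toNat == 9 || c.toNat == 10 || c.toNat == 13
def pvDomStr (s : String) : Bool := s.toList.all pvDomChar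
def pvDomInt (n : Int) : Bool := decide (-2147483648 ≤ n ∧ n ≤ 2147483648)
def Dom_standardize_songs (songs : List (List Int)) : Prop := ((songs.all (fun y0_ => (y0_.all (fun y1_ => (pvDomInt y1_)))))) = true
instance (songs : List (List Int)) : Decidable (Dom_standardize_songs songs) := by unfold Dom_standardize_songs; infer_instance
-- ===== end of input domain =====

-- B replaces A's quotient/remainder block construction (repeat + slice, accumulator loop)
-- by a comprehension that cycles each song with per-element modulo indexing (idiomatic, same cost).


-- ===== PORT A =====
-- max(map(len, songs)); Python raises ValueError on an empty list (excluded by Pre_), getD 0 is unreached there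
def standardize_songs (songs : List (List Int)) : List (List Int) :=
  let max_song_length : Int :=
    (PySem.List.max? (songs.map (fun (s : List Int) => (s.length : Int))) id).getD 0
  songs.foldl (fun adjusted_songs song =>
    let song_length : Int := song.length
    let full_addition : Int := PySem.Int.floordiv max_song_length song_length
    let part_addition : Int := PySem.Int.mod max_song_length song_length
    let adjusted_song : List Int :=
      (List.replicate full_addition.toNat song).flatten
        ++ PySem.List.slice song none (some part_addition)
    adjusted_songs ++ [adjusted_song]) []

-- ===== PORT B =====
def standardize_songs_alt (songs : List (List Int)) : List (List Int) :=
  let max_song_length : Int :=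
    (PySem.List.max? (songs.map (fun (s : List Int) => (s.length : Int))) id).getD 0
  songs.map (fun song =>
    (PySem.List.pyRange 0 max_song_length 1).map (fun i =>
      PySem.List.pyGetD song (PySem.Int.mod i (song.length : Int)) 0))

-- ===== PRECONDITION & SPEC =====
-- Python A raises ValueError on songs = [] (max of an empty sequence) and ZeroDivisionError
-- ('//' and '%' by len 0) whenever some song is empty: exactly those inputs are excluded.
def Pre_standardize_songs (songs : List (List Int)) : Prop :=
  songs ≠ [] ∧ ∀ s ∈ songs, s ≠ []
instance (songs : List (List Int)) : Decidable (Pre_standardize_songs songs) := by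
  unfold Pre_standardize_songs; infer_instance
def pvWitness_standardize_songs : List (List Int) := [[1], [2, 3]]

def Spec_standardize_songs (songs : List (List Int)) (out : List (List Int)) : Prop := out = standardize_songs_alt songs
instance (songs : List (List Int)) (out : List (List Int)) : Decidable (Spec_standardize_songs songs out) := by unfold Spec_standardize_songs; infer_instance

-- ===== CLAIM (what is proved, stated in full; the proofs are below) =====
def Claim_equal_standardize_songs : Prop := ∀ (songs : List (List Int)), Dom_standardize_songs songs → Pre_standardize_songs songs → Spec_standardize_songs songs (standardize_songs songs)

-- ===== LEMMAS AND PROOFS =====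

lemma take_concat_getD (l : List Int) (k : Nat) (h : k < l.length) :
    l.take k ++ [l.getD k 0] = l.take (k + 1) := by
  rw [List.take_add_one, List.getElem?_eq_getElem h, List.getD_eq_getElem _ _ h]; simp

-- cycling by modulo indexing equals quotient-many full copies plus a remainder prefix
lemma cycle_eq_blocks (song : List Int) (hs : song ≠ []) (n : Nat) :
    (List.range n).map (fun i => song.getD (i % song.length) 0)
      = (List.replicate (n / song.length) song).flatten
          ++ song.take (n % song.length) := by
  have hL : 0 < song.length := List.length_pos_iff.mpr hs
  induction n with
  | zero => simp
  | succ n ih =>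
    have hr : n % song.length < song.length := Nat.mod_lt n hL
    have hsum : n + 1 = song.length * (n / song.length) + (n % song.length + 1) := by
      have := Nat.div_add_mod n song.length; omega
    rw [List.range_succ, List.map_append, ih, List.map_singleton, List.append_assoc,
      take_concat_getD song _ hr]
    by_cases h : n % song.length + 1 = song.length
    · have h1 : (n + 1) % song.length = 0 := by
        rw [hsum, Nat.mul_add_mod, h, Nat.mod_self]
      have h2 : (n + 1) / song.length = n / song.length + 1 := by
        rw [hsum, Nat.mul_add_div hL, h, Nat.div_self hL]
      rw [h1, h2, h, List.take_of_length_le (le_refl _), List.replicate_succ',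
        List.flatten_append]
      simp
    · have hlt : n % song.length + 1 < song.length := by omega
      have h1 : (n + 1) % song.length = n % song.length + 1 := by
        rw [hsum, Nat.mul_add_mod, Nat.mod_eq_of_lt hlt]
      have h2 : (n + 1) / song.length = n / song.length := by
        rw [hsum, Nat.mul_add_div hL, Nat.div_eq_of_lt hlt]; omega
      rw [h1, h2]

-- per-song agreement at the Int level, for any nonnegative target length m
lemma song_eq (song : List Int) (hs : song ≠ []) (m : Int) (hm : 0 ≤ m) :
    (PySem.List.pyRange 0 m 1).map (fun i =>
        PySem.List.pyGetD song (PySem.Int.mod i (song.length : Int)) 0)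
      = (List.replicate (PySem.Int.floordiv m (song.length : Int)).toNat song).flatten
          ++ PySem.List.slice song none (some (PySem.Int.mod m (song.length : Int))) := by
  obtain ⟨n, rfl⟩ : ∃ k : Nat, m = (k : Int) := ⟨m.toNat, (Int.toNat_of_nonneg hm).symm⟩
  rw [PySem.List.pyRange_zero_nat, List.map_map, PySem.Int.floordiv_natCast,
    PySem.Int.mod_natCast, PySem.List.slice_to _ (by positivity)]
  simp only [Function.comp_def, PySem.Int.mod_natCast, PySem.List.pyGetD_natCast,
    Int.toNat_natCast]
  exact cycle_eq_blocks song hs n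

-- ===== VERDICT (by name: the statement is the Claim_ definition above) =====
theorem standardize_songs_spec : Claim_equal_standardize_songs := by
  intro songs _ hpre
  obtain ⟨hne, hall⟩ := hpre
  unfold Spec_standardize_songs standardize_songs standardize_songs_alt
  rw [PySem.List.foldl_append_singleton_eq_map]
  simp only [List.nil_append]
  apply List.map_congr_left
  intro song hmem
  have hm : 0 ≤ (PySem.List.max? (songs.map (fun (s : List Int) => (s.length : Int))) id).getD 0 := by
    rcases h : PySem.List.max? (songs.map (fun (s : List Int) => (s.length : Int))) id with _ | v
    · simp
    · have hv : v ∈ songs.map (fun (s : List Int) => (s.length : Int)) :=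
        PySem.List.max?_mem h
      simp only [List.mem_map] at hv
      obtain ⟨s, _, rfl⟩ := hv
      simp
  exact (song_eq song (hall song hmem) _ hm).symm
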